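-- pv_equiv track=rewrite | github.com/ankitshah009/leetcode_python | graphs/950-reveal_cards_in_increasing_order.py | deckRevealedIncreasing
-- ===== SOURCE A (Python) =====
-- from collections import deque
--
-- def deckRevealedIncreasing(deck: list[int]) -> list[int]:
--     """
--     Simulate in reverse: work backwards from sorted deck.
--     """
--     deck.sort(reverse=True)
--     result = deque()
--
--     for card in deck:
--         if result:
--             # Reverse of putting top to bottom: move bottom to top
--             result.appendleft(result.pop())
--         result.appendleft(card)
--
--     return list(result)
-- ===== SOURCE B (Python) =====
-- from collections import deque
--
-- def deckRevealedIncreasing(deck: list[int]) -> list[int]: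
--     # Forward simulation over an index queue (A rebuilds the deque backwards).
--     deck.sort(reverse=True)
--     n = len(deck)
--     idx = deque(range(n))
--     result = [0] * n
--     for card in reversed(deck):
--         result[idx.popleft()] = card
--         if idx:
--             idx.append(idx.popleft())
--     return result
-- ===== Notes on version B (the rewrite author's own statement) =====
-- stated objective: alternative
-- what changed: B replaces A's backwards deque reconstruction (rotate bottom card to top, push next card on top) by a forward simulation of the reveal process: an index queue is popped/rotated while the cards in ascending order are written into a preallocated result array.
import Mathlib
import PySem

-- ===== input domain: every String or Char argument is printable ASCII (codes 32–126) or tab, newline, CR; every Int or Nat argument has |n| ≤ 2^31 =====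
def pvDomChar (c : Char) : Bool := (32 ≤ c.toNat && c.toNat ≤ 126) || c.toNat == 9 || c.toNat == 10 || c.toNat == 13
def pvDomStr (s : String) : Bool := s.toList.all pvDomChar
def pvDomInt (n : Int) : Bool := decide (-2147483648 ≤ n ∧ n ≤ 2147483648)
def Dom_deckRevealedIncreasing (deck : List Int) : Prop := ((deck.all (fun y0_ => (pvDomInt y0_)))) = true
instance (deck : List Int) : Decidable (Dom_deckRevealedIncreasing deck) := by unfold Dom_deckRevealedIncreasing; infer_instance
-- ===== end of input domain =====

-- B replaces A's backwards deque reconstruction by a forward reveal simulation over an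
-- index queue (objective: alternative). Both A and B sort the input list descending in
-- place (same mutation); the theorems are about the return value.

-- ===== PORT A =====
-- deque with its LEFT end at the list head: appendleft = cons, pop = remove last.
-- "result.appendleft(result.pop())" = move the last element to the front:
def pvRotFront : List Int → List Int
  | [] => []
  | x :: xs => (xs.getLastD x) :: (x :: xs).dropLast

def deckRevealedIncreasing (deck : List Int) : List Int :=
  let d := PySem.List.sorted deck (fun x => x) true   -- deck.sort(reverse=True)
  d.foldl (fun r card => card :: pvRotFront r) []

-- ===== PORT B =====
-- "idx.append(idx.popleft())" (guarded by "if idx:"):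
def pvRotQ : List Nat → List Nat
  | [] => []
  | i :: q => q ++ [i]

-- the for-loop of B: cards in ascending order, index queue, result array
def pvAltLoop : List Int → List Nat → List Int → List Int
  | [], _, res => res
  | _ :: _, [], res => res          -- unreachable: the queue and the card list have equal length
  | card :: rest, i :: q, res => pvAltLoop rest (pvRotQ q) (res.set i card)

def deckRevealedIncreasing_alt (deck : List Int) : List Int :=
  let d := PySem.List.sorted deck (fun x => x) true   -- deck.sort(reverse=True)
  let n := d.length
  pvAltLoop d.reverse (List.range n) (List.replicate n 0)

-- ===== PRECONDITION & SPEC =====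
def Spec_deckRevealedIncreasing (deck : List Int) (out : List Int) : Prop := out = deckRevealedIncreasing_alt deck
instance (deck : List Int) (out : List Int) : Decidable (Spec_deckRevealedIncreasing deck out) := by unfold Spec_deckRevealedIncreasing; infer_instance

-- ===== CLAIM (what is proved, stated in full; the proofs are below) =====
def Claim_equal_deckRevealedIncreasing : Prop := ∀ (deck : List Int), Dom_deckRevealedIncreasing deck → Spec_deckRevealedIncreasing deck (deckRevealedIncreasing deck)

-- ===== LEMMAS AND PROOFS =====

-- A's loop body as a function, and A's loop on an arbitrary descending prefix
def pvArr (d : List Int) : List Int := d.foldl (fun r card => card :: pvRotFront r) []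

-- the sequence of indices popped from a queue evolving by pvRotQ
def pvPopSeq : List Nat → List Nat
  | [] => []
  | i :: q => i :: pvPopSeq (pvRotQ q)
  termination_by q => q.length
  decreasing_by simp [pvRotQ]; cases q <;> simp

-- sequential array assignment
def pvFoldSet (res : List Int) (ps : List (Nat × Int)) : List Int :=
  ps.foldl (fun r p => r.set p.1 p.2) res

theorem pvRotQ_length (q : List Nat) : (pvRotQ q).length = q.length := by
  cases q <;> simp [pvRotQ]

theorem pvRotQ_map (f : Nat → Nat) (q : List Nat) : pvRotQ (q.map f) = (pvRotQ q).map f := by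
  cases q <;> simp [pvRotQ]

theorem pvRotQ_perm (q : List Nat) : (pvRotQ q).Perm q := by
  cases q with
  | nil => simp [pvRotQ]
  | cons x xs => simpa [pvRotQ] using (List.perm_append_singleton x xs)

theorem pvPopSeq_length (q : List Nat) : (pvPopSeq q).length = q.length := by
  induction q using pvPopSeq.induct with
  | case1 => simp [pvPopSeq]
  | case2 i q ih => simp [pvPopSeq, ih, pvRotQ_length]

theorem pvPopSeq_map (f : Nat → Nat) (q : List Nat) :
    pvPopSeq (q.map f) = (pvPopSeq q).map f := by
  induction q using pvPopSeq.induct with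
  | case1 => simp [pvPopSeq]
  | case2 i q ih => simp [pvPopSeq, pvRotQ_map, ih]

theorem pvPopSeq_perm (q : List Nat) : (pvPopSeq q).Perm q := by
  induction q using pvPopSeq.induct with
  | case1 => simp [pvPopSeq]
  | case2 i q ih =>
      simpa [pvPopSeq] using (ih.trans (pvRotQ_perm q)).cons i

theorem pvAltLoop_eq_foldSet (cards : List Int) (q : List Nat) (res : List Int) :
    pvAltLoop cards q res = pvFoldSet res ((pvPopSeq q).zip cards) := by
  induction cards generalizing q res with
  | nil => cases q <;> simp [pvAltLoop, pvFoldSet]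
  | cons c rest ih =>
      cases q with
      | nil => simp [pvAltLoop, pvPopSeq, pvFoldSet]
      | cons i q' => simp [pvAltLoop, pvPopSeq, pvFoldSet, ih, List.foldl_cons]

theorem pvFoldSet_length (ps : List (Nat × Int)) (res : List Int) :
    (pvFoldSet res ps).length = res.length := by
  induction ps generalizing res with
  | nil => simp [pvFoldSet]
  | cons p ps ih => simp [pvFoldSet, List.foldl_cons] at *; simp [ih]

theorem pvFoldSet_getElem_not_mem (ps : List (Nat × Int)) (res : List Int) (j : Nat)
    (hj : j ∉ ps.map Prod.fst) : (pvFoldSet res ps)[j]? = res[j]? := by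
  induction ps generalizing res with
  | nil => simp [pvFoldSet]
  | cons p ps ih =>
      simp only [List.map_cons, List.mem_cons] at hj
      push_neg at hj
      simp only [pvFoldSet, List.foldl_cons] at *
      rw [ih _ hj.2]
      exact List.getElem?_set_ne (by intro h; exact hj.1 h.symm)

theorem pvFoldSet_getElem_mem (ps : List (Nat × Int)) (res : List Int) (i : Nat) (v : Int)
    (hnd : (ps.map Prod.fst).Nodup) (hmem : (i, v) ∈ ps) (hi : i < res.length) :
    (pvFoldSet res ps)[i]? = some v := by
  induction ps generalizing res with
  | nil => simp at hmem
  | cons p ps ih =>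
      simp only [List.map_cons, List.nodup_cons] at hnd
      rcases List.mem_cons.1 hmem with h | h
      · subst h
        simp only [pvFoldSet, List.foldl_cons]
        rw [show (List.foldl (fun r p => r.set p.1 p.2) (res.set i v) ps) =
              pvFoldSet (res.set i v) ps from rfl,
            pvFoldSet_getElem_not_mem _ _ _ hnd.1]
        simp [List.getElem?_set_self, hi]
      · simpa [pvFoldSet, List.foldl_cons] using
          ih (res.set p.1 p.2) hnd.2 h (by simpa using hi)

theorem pvArr_concat (xs : List Int) (c : Int) :
    pvArr (xs ++ [c]) = c :: pvRotFront (pvArr xs) := by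
  simp [pvArr, List.foldl_append]

theorem pvRotQ_getElem (l : List Nat) (j : Nat) (hj : j < l.length) :
    (pvRotQ l)[j]'(by simpa [pvRotQ_length] using hj) = l[(j + 1) % l.length]'
      (Nat.mod_lt _ (by omega)) := by
  cases l with
  | nil => simp at hj
  | cons x xs =>
      simp only [pvRotQ]
      by_cases h : j < xs.length
      · rw [List.getElem_append_left (by simpa using h)]
        have h2 : (j + 1) % (xs.length + 1) = j + 1 := Nat.mod_eq_of_lt (by omega)
        simp [h2]
      · have hj' : j = xs.length := by simp at hj; omega
        subst hj'
        rw [List.getElem_append_right (by simp)]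
        simp [Nat.mod_self]

theorem pvGetLastD (xs : List Int) (x : Int) :
    xs.getLastD x = (x :: xs)[xs.length]'(by simp) := by
  induction xs generalizing x with
  | nil => simp
  | cons y ys ih =>
      show (y :: ys).getLastD x = (x :: y :: ys)[ys.length + 1]
      rw [List.getLastD_cons, List.getElem_cons_succ]
      exact ih y

theorem pvRotFront_length (r : List Int) : (pvRotFront r).length = r.length := by
  cases r <;> simp [pvRotFront]

theorem pvRotFront_getElem? (r : List Int) (t : Nat) (ht : t < r.length) :
    (pvRotFront r)[t]? = r[(t + r.length - 1) % r.length]? := by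
  cases r with
  | nil => simp at ht
  | cons x xs =>
      cases t with
      | zero =>
          simp only [pvRotFront, List.getElem?_cons_zero]
          have h1 : (0 + (x :: xs).length - 1) % (x :: xs).length = xs.length := by
            simp [Nat.mod_eq_of_lt]
          rw [h1]
          rw [List.getElem?_eq_getElem (by simp)]
          exact congrArg some (pvGetLastD xs x)
      | succ s =>
          simp only [pvRotFront, List.getElem?_cons_succ]
          have hs : s < xs.length := by simpa using ht
          have h1 : (s + 1 + (x :: xs).length - 1) % (x :: xs).length = s := by
            simp only [List.length_cons]
            have : s + 1 + (xs.length + 1) - 1 = s + (xs.length + 1) := by omega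
            rw [this, Nat.add_mod_right]
            exact Nat.mod_eq_of_lt (by omega)
          rw [h1, List.getElem?_eq_getElem (l := x :: xs) (by simp; omega),
              List.getElem?_eq_getElem (by simpa [List.length_dropLast] using hs)]
          simp [List.getElem_dropLast]

theorem pv_f_rot (m : Nat) :
    pvRotQ ((List.range m).map Nat.succ) = (List.range m).map (fun k => (k + 1) % m + 1) := by
  apply List.ext_getElem
  · simp [pvRotQ_length]
  · intro j h1 h2
    have hj : j < m := by simpa using h2
    have hrot := pvRotQ_getElem ((List.range m).map Nat.succ) j (by simpa using hj)
    simp only [List.length_map, List.length_range] at hrot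
    rw [hrot]
    have hlt : (j + 1) % m < m := Nat.mod_lt _ (by omega)
    simp [hlt, Nat.succ_eq_add_one]

theorem pv_f_inj (m : Nat) (a b : Nat) (ha : a < m) (hb : b < m)
    (h : (a + 1) % m + 1 = (b + 1) % m + 1) : a = b := by
  have h' : (a + 1) % m = (b + 1) % m := by omega
  by_cases h1 : a + 1 = m <;> by_cases h2 : b + 1 = m
  · omega
  · rw [h1, Nat.mod_self, Nat.mod_eq_of_lt (by omega)] at h'; omega
  · rw [h2, Nat.mod_self, Nat.mod_eq_of_lt (by omega)] at h'; omega
  · rw [Nat.mod_eq_of_lt (by omega), Nat.mod_eq_of_lt (by omega)] at h'; omega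

-- the main bridge: B's fold over the popped-index sequence builds A's deque result
theorem pv_main (ys : List Int) :
    pvFoldSet (List.replicate ys.length 0) ((pvPopSeq (List.range ys.length)).zip ys) =
      pvArr ys.reverse := by
  induction ys with
  | nil => simp [pvFoldSet, pvPopSeq, pvArr]
  | cons c ys' ih =>
      have hm := rfl (a := ys'.length)
      -- abbreviations
      have key : ∀ (P : List Nat) (r : List Int),
          P = pvPopSeq (List.range ys'.length) →
          r = pvFoldSet (List.replicate ys'.length 0) (P.zip ys') →
          pvFoldSet (List.replicate (ys'.length + 1) 0)
              ((0 :: P.map (fun k => (k + 1) % ys'.length + 1)).zip (c :: ys')) =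
            c :: pvRotFront r := by
        intro P r hPdef hrdef
        have hPperm : P.Perm (List.range ys'.length) := hPdef ▸ pvPopSeq_perm _
        have hPlen : P.length = ys'.length := by
          rw [hPdef, pvPopSeq_length, List.length_range]
        have hPnd : P.Nodup := hPperm.nodup_iff.2 List.nodup_range
        have hPmem : ∀ k ∈ P, k < ys'.length := fun k hk => List.mem_range.1 (hPperm.mem_iff.1 hk)
        have hrlen : r.length = ys'.length := by
          rw [hrdef, pvFoldSet_length, List.length_replicate]
        have hfold : ∀ res : List Int, ∀ ps : List (Nat × Int),
            pvFoldSet res ((0, c) :: ps) = pvFoldSet (res.set 0 c) ps := by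
          intro res ps; simp [pvFoldSet]
        have hfst : ((P.map (fun k => (k + 1) % ys'.length + 1)).zip ys').map Prod.fst =
            P.map (fun k => (k + 1) % ys'.length + 1) :=
          List.map_fst_zip (by simp [hPlen])
        have hndf : (P.map (fun k => (k + 1) % ys'.length + 1)).Nodup :=
          List.Nodup.map_on
            (fun a ha b hb hab => pv_f_inj ys'.length a b (hPmem a ha) (hPmem b hb) hab) hPnd
        rw [List.zip_cons_cons, hfold]
        apply List.ext_getElem?
        intro j
        by_cases hj : j < ys'.length + 1
        · cases j with
          | zero =>
              have h0 : (0 : Nat) ∉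
                  ((P.map (fun k => (k + 1) % ys'.length + 1)).zip ys').map Prod.fst := by
                rw [hfst]; simp
              rw [pvFoldSet_getElem_not_mem _ _ _ h0]
              simp
          | succ t =>
              have htm : t < ys'.length := by omega
              have hm1 : 1 ≤ ys'.length := by omega
              -- the queue position k whose reveal index is t+1
              have hkey : ∀ k : Nat, k < ys'.length → (k + 1) % ys'.length + 1 = t + 1 →
                  (pvFoldSet ((List.replicate (ys'.length + 1) 0).set 0 c)
                      ((P.map (fun k => (k + 1) % ys'.length + 1)).zip ys'))[t + 1]? =
                    (c :: pvRotFront r)[t + 1]? := by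
                intro k hkm hfk
                obtain ⟨i0, hi0, hPi0⟩ :=
                  List.mem_iff_getElem.1 (hPperm.mem_iff.2 (List.mem_range.2 hkm))
                have hi0' : i0 < ys'.length := hPlen ▸ hi0
                have hkv : (k, ys'[i0]) ∈ P.zip ys' := by
                  have hz : (P.zip ys')[i0]'(by simp [hPlen]; omega) = (k, ys'[i0]) := by
                    simp [List.getElem_zip, hPi0]
                  exact hz ▸ List.getElem_mem _
                have hfkv : ((k + 1) % ys'.length + 1, ys'[i0]) ∈
                    (P.map (fun k => (k + 1) % ys'.length + 1)).zip ys' := by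
                  rw [List.zip_map_left]
                  exact List.mem_map.2 ⟨(k, ys'[i0]), hkv, rfl⟩
                have hlhs : (pvFoldSet ((List.replicate (ys'.length + 1) 0).set 0 c)
                    ((P.map (fun k => (k + 1) % ys'.length + 1)).zip ys'))[(k + 1) % ys'.length + 1]? =
                      some ys'[i0] :=
                  pvFoldSet_getElem_mem _ _ _ _ (by rw [hfst]; exact hndf) hfkv
                    (by simp only [List.length_set, List.length_replicate]
                        have h := Nat.mod_lt (k + 1) (show 0 < ys'.length by omega)
                        omega)
                have hrk : r[k]? = some ys'[i0] := by
                  rw [hrdef]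
                  exact pvFoldSet_getElem_mem _ _ _ _
                    (by rw [List.map_fst_zip (by simp [hPlen])]; exact hPnd) hkv
                    (by simp [hkm])
                have hidx : (t + ys'.length - 1) % ys'.length = k := by
                  by_cases hk1 : k + 1 = ys'.length
                  · have ht0 : t = 0 := by
                      rw [hk1, Nat.mod_self] at hfk; omega
                    subst ht0
                    rw [Nat.mod_eq_of_lt (by omega)]; omega
                  · have hmk : (k + 1) % ys'.length = k + 1 :=
                      Nat.mod_eq_of_lt (by omega)
                    rw [hmk] at hfk
                    have ht : t = k + 1 := by omega
                    subst ht
                    rw [show k + 1 + ys'.length - 1 = k + ys'.length from by omega,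
                        Nat.add_mod_right, Nat.mod_eq_of_lt hkm]
                calc (pvFoldSet ((List.replicate (ys'.length + 1) 0).set 0 c)
                        ((P.map (fun k => (k + 1) % ys'.length + 1)).zip ys'))[t + 1]?
                    = some ys'[i0] := by rw [← hfk]; exact hlhs
                  _ = r[k]? := hrk.symm
                  _ = (c :: pvRotFront r)[t + 1]? := by
                      rw [List.getElem?_cons_succ,
                          pvRotFront_getElem? r t (by omega), hrlen, hidx]
              by_cases ht : t = 0
              · exact hkey (ys'.length - 1) (by omega)
                  (by subst ht; rw [show ys'.length - 1 + 1 = ys'.length from by omega,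
                        Nat.mod_self])
              · exact hkey (t - 1) (by omega)
                  (by rw [show t - 1 + 1 = t from by omega, Nat.mod_eq_of_lt htm])
        · rw [List.getElem?_eq_none, List.getElem?_eq_none]
          · simp [pvRotFront_length, hrlen]; omega
          · rw [pvFoldSet_length]; simp; omega
      rw [List.length_cons, List.reverse_cons, pvArr_concat, ← ih,
          List.range_succ_eq_map]
      have : pvPopSeq (0 :: (List.range ys'.length).map Nat.succ) =
          0 :: (pvPopSeq (List.range ys'.length)).map (fun k => (k + 1) % ys'.length + 1) := by
        conv_lhs => rw [pvPopSeq]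
        rw [pv_f_rot, pvPopSeq_map]
      rw [this]
      exact key _ _ rfl rfl

-- ===== VERDICT (by name: the statement is the Claim_ definition above) =====
theorem deckRevealedIncreasing_spec : Claim_equal_deckRevealedIncreasing := by
  intro deck _
  show deckRevealedIncreasing deck = deckRevealedIncreasing_alt deck
  unfold deckRevealedIncreasing deckRevealedIncreasing_alt
  rw [pvAltLoop_eq_foldSet]
  have := pv_main (PySem.List.sorted deck (fun x => x) true).reverse
  simpa [pvArr] using this.symm
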